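-- pv_equiv track=rewrite | github.com/vitaly-krugl/interview-prep | frog_river/frog_river.py | _is_crossable_helper
-- ===== SOURCE A (Python) =====
-- SPEED_OFFSETS = [-1, 0, 1]
--
-- def _is_crossable_helper(river, cached_attempts, pos, speed):
--     if (pos, speed) in cached_attempts:
--         return False # been there, done that
--
--     cached_attempts.add((pos, speed))
--
--     if pos >= len(river):
--         return True # crossed - yay!
--     if river[pos] == " ":
--         return False # drowned :(
--
--     for offset in SPEED_OFFSETS:
--         new_speed = speed + offset
--         if new_speed <= 0: # may only go forward
--             continue
--
--         if _is_crossable_helper(river, cached_attempts, pos + new_speed, new_speed):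
--             return True
--
--     return False
-- ===== SOURCE B (Python) =====
-- SPEED_OFFSETS = [-1, 0, 1]
--
-- def _is_crossable_helper(river, cached_attempts, pos, speed):
--     stack = [(pos, speed)]
--     while stack:
--         p, s = stack.pop()
--         if (p, s) in cached_attempts:
--             continue  # been there, done that
--         cached_attempts.add((p, s))
--         if p >= len(river):
--             return True  # crossed - yay!
--         if river[p] == " ":
--             continue  # drowned :(
--         # push in reverse offset order so the slowest speed is explored first
--         for offset in (1, 0, -1):
--             new_speed = s + offset
--             if new_speed > 0:  # may only go forward
--                 stack.append((p + new_speed, new_speed))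
--     return False
-- ===== Notes on version B (the rewrite author's own statement) =====
-- stated objective: alternative
-- what changed: Replaces A's recursive DFS (with a for-loop over speed offsets and early return) by an iterative DFS driven by an explicit stack of (pos, speed) states, pushing offsets in reverse order so the same pre-order and early exit are kept.
import Mathlib
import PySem

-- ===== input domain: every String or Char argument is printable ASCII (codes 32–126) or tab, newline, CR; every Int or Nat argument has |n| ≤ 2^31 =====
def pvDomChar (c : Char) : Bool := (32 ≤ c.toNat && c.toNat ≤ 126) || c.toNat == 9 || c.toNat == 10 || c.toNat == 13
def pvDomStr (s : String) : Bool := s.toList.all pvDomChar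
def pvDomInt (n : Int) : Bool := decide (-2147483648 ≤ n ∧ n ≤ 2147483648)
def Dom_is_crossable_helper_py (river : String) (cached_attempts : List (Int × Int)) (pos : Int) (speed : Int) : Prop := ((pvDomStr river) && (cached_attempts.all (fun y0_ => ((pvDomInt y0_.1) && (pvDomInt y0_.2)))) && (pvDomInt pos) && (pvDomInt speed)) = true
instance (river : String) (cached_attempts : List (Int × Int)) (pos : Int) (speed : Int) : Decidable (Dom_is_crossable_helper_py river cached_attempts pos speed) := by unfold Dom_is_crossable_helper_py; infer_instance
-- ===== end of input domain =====

-- B replaces A's recursive DFS by an iterative DFS over an explicit stack of (pos, speed) states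
-- (same pre-order, so even the mutated cached_attempts set ends identical); the equivalence proved
-- here is about the RETURN value (both Pythons mutate the caller's cached_attempts set identically).

-- ===== PORT A =====
-- Recursive helper threading the mutated set 'cached_attempts' explicitly: returns (result, set).
-- The 'for offset in SPEED_OFFSETS' loop with its early return is unrolled into its three steps.
-- The Nat argument is a fuel guard making the recursion structural; every recursive call strictly
-- increases pos while pos < len(river), so fuel (len(river) - pos).toNat + 1 never runs out.
-- At an out-of-range index (Str.pyGet? = none) Python raises IndexError: excluded by Pre_ below.
def pvAuxA (river : String) : Nat → List (Int × Int) → Int → Int → Bool × List (Int × Int)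
  | 0, cache, _, _ => (false, cache)  -- unreachable under the fuel given below
  | fuel + 1, cache, pos, speed =>
    if cache.contains (pos, speed) then (false, cache)
    else
      let cache1 := PySem.Set.add cache (pos, speed)
      if pos ≥ PySem.Str.len river then (true, cache1)
      else
        match PySem.Str.pyGet? river pos with
        | none => (false, cache1)   -- IndexError in Python; value irrelevant (outside Pre_)
        | some c =>
          if c = ' ' then (false, cache1)
          else
            let r1 := if speed - 1 > 0 then
                pvAuxA river fuel cache1 (pos + (speed - 1)) (speed - 1) else (false, cache1)
            if r1.1 then (true, r1.2)
            else
              let r2 := if speed > 0 then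
                  pvAuxA river fuel r1.2 (pos + speed) speed else (false, r1.2)
              if r2.1 then (true, r2.2)
              else
                let r3 := if speed + 1 > 0 then
                    pvAuxA river fuel r2.2 (pos + (speed + 1)) (speed + 1) else (false, r2.2)
                if r3.1 then (true, r3.2) else (false, r3.2)

def is_crossable_helper_py (river : String) (cached_attempts : List (Int × Int)) (pos : Int) (speed : Int) : Bool :=
  (pvAuxA river ((PySem.Str.len river - pos).toNat + 1) cached_attempts pos speed).1

-- ===== PORT B =====
-- weight of one stack entry and measure of the stack: a fuel bound for the loop (each iteration
-- strictly decreases the measure, see pvMeasure_push below); fuel only guards, it is never reached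
def pvW (river : String) (p : Int) : Nat := 4 ^ (PySem.Str.len river - p).toNat

def pvMeasure (river : String) (stack : List (Int × Int)) : Nat :=
  (stack.map (fun st => pvW river st.1)).sum

-- the while-stack loop of B; the list head is the top of Python's stack
def pvRunB (river : String) : Nat → List (Int × Int) → List (Int × Int) → Bool
  | 0, _, _ => false  -- unreachable under the fuel given below
  | _ + 1, _, [] => false
  | fuel + 1, cache, (p, s) :: rest =>
      if cache.contains (p, s) then pvRunB river fuel cache rest
      else
        let cache1 := PySem.Set.add cache (p, s)
        if p ≥ PySem.Str.len river then true
        else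
          (PySem.Str.pyGet? river p).elim
            (pvRunB river fuel cache1 rest)   -- IndexError in Python; outside Pre_
            (fun c =>
              if c = ' ' then pvRunB river fuel cache1 rest
              else
                -- pushes for offsets (1, 0, -1); head of the list = last push = top of stack
                pvRunB river fuel cache1
                  ((if s - 1 > 0 then [(p + (s - 1), s - 1)] else []) ++
                   (if s > 0 then [(p + s, s)] else []) ++
                   (if s + 1 > 0 then [(p + (s + 1), s + 1)] else []) ++ rest))

def is_crossable_helper_py_alt (river : String) (cached_attempts : List (Int × Int)) (pos : Int) (speed : Int) : Bool :=
  pvRunB river (pvMeasure river [(pos, speed)] + 1) cached_attempts [(pos, speed)]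

-- ===== PRECONDITION & SPEC =====
-- Pre_ excludes exactly the inputs on which Python A raises IndexError: a starting pos below
-- -len(river) that is not already cached (every recursively visited position strictly increases,
-- so only the initial pos can be below -len(river)).
def Pre_is_crossable_helper_py (river : String) (cached_attempts : List (Int × Int)) (pos : Int) (speed : Int) : Prop :=
  pos ≥ -(PySem.Str.len river) ∨ (pos, speed) ∈ cached_attempts
instance (river : String) (cached_attempts : List (Int × Int)) (pos : Int) (speed : Int) : Decidable (Pre_is_crossable_helper_py river cached_attempts pos speed) := by unfold Pre_is_crossable_helper_py; infer_instance

def pvWitness_is_crossable_helper_py : String × (List (Int × Int)) × Int × Int := ("x x", [], 0, 1)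

def Spec_is_crossable_helper_py (river : String) (cached_attempts : List (Int × Int)) (pos : Int) (speed : Int) (out : Bool) : Prop := out = is_crossable_helper_py_alt river cached_attempts pos speed
instance (river : String) (cached_attempts : List (Int × Int)) (pos : Int) (speed : Int) (out : Bool) : Decidable (Spec_is_crossable_helper_py river cached_attempts pos speed out) := by unfold Spec_is_crossable_helper_py; infer_instance

-- ===== CLAIM (what is proved, stated in full; the proofs are below) =====
def Claim_equal_is_crossable_helper_py : Prop := ∀ (river : String) (cached_attempts : List (Int × Int)) (pos : Int) (speed : Int), Dom_is_crossable_helper_py river cached_attempts pos speed → Pre_is_crossable_helper_py river cached_attempts pos speed → Spec_is_crossable_helper_py river cached_attempts pos speed (is_crossable_helper_py river cached_attempts pos speed)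

-- ===== LEMMAS AND PROOFS =====

lemma pvW_pos (river : String) (p : Int) : 0 < pvW river p := Nat.pow_pos (by norm_num)

lemma pvW_le (river : String) {p q : Int} (h : p + 1 ≤ q) : pvW river q ≤ pvW river (p + 1) :=
  Nat.pow_le_pow_right (by norm_num) (by omega)

lemma pvW_succ (river : String) {p : Int} (h : p < PySem.Str.len river) :
    pvW river p = 4 * pvW river (p + 1) := by
  unfold pvW
  have : (PySem.Str.len river - p).toNat = (PySem.Str.len river - (p + 1)).toNat + 1 := by omega
  rw [this, pow_succ]; ring

lemma pvMeasure_cons (river : String) (p s : Int) (l : List (Int × Int)) :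
    pvMeasure river ((p, s) :: l) = pvW river p + pvMeasure river l := by
  simp [pvMeasure]

-- measure of the stack after the (up to three) pushes of one loop iteration
lemma pvMeasure_push (river : String) (rest : List (Int × Int)) (p s : Int)
    (hp : p < PySem.Str.len river) :
    pvMeasure river
      ((if s - 1 > 0 then [(p + (s - 1), s - 1)] else []) ++
       (if s > 0 then [(p + s, s)] else []) ++
       (if s + 1 > 0 then [(p + (s + 1), s + 1)] else []) ++ rest)
      < pvMeasure river ((p, s) :: rest) := by
  have h4 := pvW_succ river hp
  have hpos := pvW_pos river (p + 1)
  have l1 : pvMeasure river (if s - 1 > 0 then [(p + (s - 1), s - 1)] else []) ≤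
      pvW river (p + 1) := by
    split
    · simpa [pvMeasure] using pvW_le river (p := p) (by omega)
    · simp [pvMeasure]
  have l2 : pvMeasure river (if s > 0 then [(p + s, s)] else []) ≤ pvW river (p + 1) := by
    split
    · simpa [pvMeasure] using pvW_le river (p := p) (by omega)
    · simp [pvMeasure]
  have l3 : pvMeasure river (if s + 1 > 0 then [(p + (s + 1), s + 1)] else []) ≤
      pvW river (p + 1) := by
    split
    · simpa [pvMeasure] using pvW_le river (p := p) (by omega)
    · simp [pvMeasure]
  have hsum : ∀ a b : List (Int × Int),
      pvMeasure river (a ++ b) = pvMeasure river a + pvMeasure river b := by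
    intro a b; simp [pvMeasure]
  rw [hsum, hsum, hsum, pvMeasure_cons]
  omega

-- the loop's value does not depend on the fuel, as long as the fuel exceeds the measure
lemma pvRunB_irrel (river : String) :
    ∀ f g cache stack, pvMeasure river stack < f → pvMeasure river stack < g →
      pvRunB river f cache stack = pvRunB river g cache stack := by
  intro f
  induction f using Nat.strong_induction_on with
  | _ f ih =>
    intro g cache stack hf hg
    match stack with
    | [] =>
      match f, g, hf, hg with
      | f' + 1, g' + 1, _, _ => rfl
    | (p, s) :: rest =>
      have hw := pvW_pos river p
      have hcons := pvMeasure_cons river p s rest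
      match f, g, hf, hg with
      | f' + 1, g' + 1, hf, hg =>
        simp only [pvRunB]
        have hrest_f : pvMeasure river rest < f' := by omega
        have hrest_g : pvMeasure river rest < g' := by omega
        by_cases hc : cache.contains (p, s) = true
        · simp only [hc, if_true]
          exact ih f' (by omega) g' cache rest hrest_f hrest_g
        · simp only [hc, if_false, Bool.false_eq_true]
          by_cases hl : p ≥ PySem.Str.len river
          · simp only [if_pos hl]
          · simp only [if_neg hl]
            cases hgch : PySem.Str.pyGet? river p with
            | none =>
              simp only [hgch, Option.elim]
              exact ih f' (by omega) g' _ rest hrest_f hrest_g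
            | some c =>
              simp only [hgch, Option.elim]
              by_cases hsp : c = ' '
              · simp only [if_pos hsp]
                exact ih f' (by omega) g' _ rest hrest_f hrest_g
              · simp only [if_neg hsp]
                have hpush := pvMeasure_push river rest p s (by omega)
                exact ih f' (by omega) g' _ _ (by omega) (by omega)

-- Simulation: one pop of B's loop behaves like one call of A (same result bit, same set).
lemma pvRunB_simulates (river : String) :
    ∀ n cache pos speed rest fA fB, pvMeasure river ((pos, speed) :: rest) ≤ n → n < fB →
      (PySem.Str.len river - pos).toNat < fA →
      pvRunB river fB cache ((pos, speed) :: rest) =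
        (if (pvAuxA river fA cache pos speed).1 then true
         else pvRunB river fB (pvAuxA river fA cache pos speed).2 rest) := by
  intro n
  induction n using Nat.strong_induction_on with
  | _ n ih =>
    intro cache pos speed rest fA fB hm hfB hfA
    have hw := pvW_pos river pos
    have hcons := pvMeasure_cons river pos speed rest
    match fA, fB, hfA, hfB with
    | fA + 1, fB + 1, hfA, hfB =>
      conv_lhs => rw [pvRunB]
      simp only [pvAuxA]
      have hrest : pvMeasure river rest < fB := by omega
      have hrestB : pvMeasure river rest < fB + 1 := by omega
      by_cases hc : cache.contains (pos, speed) = true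
      · simp only [if_pos hc]; simp
        exact pvRunB_irrel river fB (fB + 1) cache rest hrest hrestB
      · simp only [if_neg hc]
        by_cases hl : pos ≥ PySem.Str.len river
        · simp only [if_pos hl]; simp
        · simp only [if_neg hl]
          cases hg : PySem.Str.pyGet? river pos with
          | none =>
            simp only [hg, Option.elim]; simp
            exact pvRunB_irrel river fB (fB + 1) _ rest hrest hrestB
          | some c =>
            simp only [hg, Option.elim]
            by_cases hsp : c = ' '
            · simp only [if_pos hsp]; simp
              exact pvRunB_irrel river fB (fB + 1) _ rest hrest hrestB
            · simp only [if_neg hsp]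
              have hpos : pos < PySem.Str.len river := by omega
              have hpush := pvMeasure_push river rest pos speed hpos
              have hlt : pvMeasure river
                  ((if speed - 1 > 0 then [(pos + (speed - 1), speed - 1)] else []) ++
                   (if speed > 0 then [(pos + speed, speed)] else []) ++
                   (if speed + 1 > 0 then [(pos + (speed + 1), speed + 1)] else []) ++ rest) < n := by
                omega
              -- renormalize the loop's remaining fuel from fB to fB + 1
              rw [pvRunB_irrel river fB (fB + 1) _ _ (by omega) (by omega)]
              by_cases h1 : speed - 1 > 0
              · -- speed ≥ 2 : all three children pushed
                have h2 : speed > 0 := by omega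
                have h3 : speed + 1 > 0 := by omega
                have hA1 : (PySem.Str.len river - (pos + (speed - 1))).toNat < fA := by omega
                have hA2 : (PySem.Str.len river - (pos + speed)).toNat < fA := by omega
                have hA3 : (PySem.Str.len river - (pos + (speed + 1))).toNat < fA := by omega
                simp only [if_pos h1, if_pos h2, if_pos h3, List.singleton_append,
                  List.cons_append, List.nil_append] at hlt ⊢
                rw [ih _ hlt (PySem.Set.add cache (pos, speed)) (pos + (speed - 1)) (speed - 1)
                      ((pos + speed, speed) :: (pos + (speed + 1), speed + 1) :: rest)
                      fA (fB + 1) le_rfl (by omega) hA1]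
                cases hb1 : (pvAuxA river fA (PySem.Set.add cache (pos, speed)) (pos + (speed - 1))
                    (speed - 1)).1
                · simp only [hb1, Bool.false_eq_true, if_false]
                  have hlt2 : pvMeasure river
                      ((pos + speed, speed) :: (pos + (speed + 1), speed + 1) :: rest) < n := by
                    have := pvMeasure_cons river (pos + (speed - 1)) (speed - 1)
                        ((pos + speed, speed) :: (pos + (speed + 1), speed + 1) :: rest)
                    have := pvW_pos river (pos + (speed - 1))
                    omega
                  rw [ih _ hlt2 _ (pos + speed) speed ((pos + (speed + 1), speed + 1) :: rest)
                        fA (fB + 1) le_rfl (by omega) hA2]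
                  cases hb2 : (pvAuxA river fA (pvAuxA river fA (PySem.Set.add cache (pos, speed))
                      (pos + (speed - 1)) (speed - 1)).2 (pos + speed) speed).1
                  · simp only [hb2, Bool.false_eq_true, if_false]
                    have hlt3 : pvMeasure river ((pos + (speed + 1), speed + 1) :: rest) < n := by
                      have := pvMeasure_cons river (pos + (speed - 1)) (speed - 1)
                          ((pos + speed, speed) :: (pos + (speed + 1), speed + 1) :: rest)
                      have := pvMeasure_cons river (pos + speed) speed
                          ((pos + (speed + 1), speed + 1) :: rest)
                      have := pvW_pos river (pos + (speed - 1))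
                      have := pvW_pos river (pos + speed)
                      omega
                    rw [ih _ hlt3 _ (pos + (speed + 1)) (speed + 1) rest fA (fB + 1) le_rfl
                          (by omega) hA3]
                    cases hb3 : (pvAuxA river fA (pvAuxA river fA (pvAuxA river fA
                        (PySem.Set.add cache (pos, speed)) (pos + (speed - 1)) (speed - 1)).2
                        (pos + speed) speed).2 (pos + (speed + 1)) (speed + 1)).1
                    · simp [hb3]
                    · simp [hb3]
                  · simp [hb2]
                · simp [hb1]
              · by_cases h2 : speed > 0
                · -- speed = 1 : children (pos+1, 1) then (pos+2, 2)
                  have h3 : speed + 1 > 0 := by omega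
                  have hA2 : (PySem.Str.len river - (pos + speed)).toNat < fA := by omega
                  have hA3 : (PySem.Str.len river - (pos + (speed + 1))).toNat < fA := by omega
                  simp only [if_neg h1, if_pos h2, if_pos h3, List.singleton_append,
                    List.cons_append, List.nil_append] at hlt ⊢
                  rw [ih _ hlt (PySem.Set.add cache (pos, speed)) (pos + speed) speed
                        ((pos + (speed + 1), speed + 1) :: rest) fA (fB + 1) le_rfl (by omega) hA2]
                  cases hb2 : (pvAuxA river fA (PySem.Set.add cache (pos, speed)) (pos + speed)
                      speed).1
                  · simp only [hb2, Bool.false_eq_true, if_false]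
                    have hlt3 : pvMeasure river ((pos + (speed + 1), speed + 1) :: rest) < n := by
                      have := pvMeasure_cons river (pos + speed) speed
                          ((pos + (speed + 1), speed + 1) :: rest)
                      have := pvW_pos river (pos + speed)
                      omega
                    rw [ih _ hlt3 _ (pos + (speed + 1)) (speed + 1) rest fA (fB + 1) le_rfl
                          (by omega) hA3]
                    cases hb3 : (pvAuxA river fA (pvAuxA river fA (PySem.Set.add cache (pos, speed))
                        (pos + speed) speed).2 (pos + (speed + 1)) (speed + 1)).1
                    · simp [hb3]
                    · simp [hb3]
                  · simp [hb2]
                · by_cases h3 : speed + 1 > 0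
                  · -- speed = 0 : single child (pos+1, 1)
                    have hA3 : (PySem.Str.len river - (pos + (speed + 1))).toNat < fA := by omega
                    simp only [if_neg h1, if_neg h2, if_pos h3, List.singleton_append,
                      List.nil_append] at hlt ⊢
                    rw [ih _ hlt (PySem.Set.add cache (pos, speed)) (pos + (speed + 1)) (speed + 1)
                          rest fA (fB + 1) le_rfl (by omega) hA3]
                    cases hb3 : (pvAuxA river fA (PySem.Set.add cache (pos, speed))
                        (pos + (speed + 1)) (speed + 1)).1
                    · simp [hb3]
                    · simp [hb3]
                  · -- speed ≤ -1 : no children pushed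
                    simp only [if_neg h1, if_neg h2, if_neg h3, List.nil_append]
                    simp

-- ===== VERDICT (by name: the statement is the Claim_ definition above) =====
theorem is_crossable_helper_py_spec : Claim_equal_is_crossable_helper_py := by
  intro river cache pos speed _ _
  unfold Spec_is_crossable_helper_py is_crossable_helper_py is_crossable_helper_py_alt
  have h := pvRunB_simulates river (pvMeasure river [(pos, speed)]) cache pos speed []
      ((PySem.Str.len river - pos).toNat + 1) (pvMeasure river [(pos, speed)] + 1)
      le_rfl (by omega) (by omega)
  rw [h]
  cases hh : (pvAuxA river ((PySem.Str.len river - pos).toNat + 1) cache pos speed).1 <;>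
    simp [pvRunB]
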